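-- pv_equiv track=rewrite | github.com/linksdl/meta-project-learning_programming_algorithms | huawei/2-中等/HJ41-.py | weightNums
-- ===== SOURCE A (Python) =====
-- def weightNums(n, m, x):
--     """
--
--     :param n:
--     :param m:
--     :param x:
--     """
--     weights = {0,}
--     amount = []
--     for i in range(n):
--         for j in range(x[i]):
--             amount.append(m[i])
--
--     for i in amount:
--         for j in list(weights):
--             weights.add(i+j)
--
--     return weights
-- ===== SOURCE B (Python) =====
-- def weightNums(n, m, x):
--     """Bounded knapsack with binary splitting of each count: instead of adding
--     one copy of a weight at a time, counts are split into chunks 1,2,4,...,rest,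
--     so each weight type needs O(log count) set-doubling rounds."""
--     reach = {0}
--     for i in range(n):
--         c = x[i]
--         if c <= 0:
--             continue
--         w, k = m[i], 1
--         while c > 0:
--             t = min(k, c)
--             reach |= {s + w * t for s in reach}
--             c -= t
--             k *= 2
--     return reach
-- ===== Notes on version B (the rewrite author's own statement) =====
-- stated objective: faster
-- what changed: A expands every count into a flat list of single copies and does one whole-set pass per copy; B keeps no copy list and splits each count into binary chunks 1,2,4,...,rest, doing one set-union per chunk, so a type with count c needs O(log c) passes instead of c.
import Mathlib
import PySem

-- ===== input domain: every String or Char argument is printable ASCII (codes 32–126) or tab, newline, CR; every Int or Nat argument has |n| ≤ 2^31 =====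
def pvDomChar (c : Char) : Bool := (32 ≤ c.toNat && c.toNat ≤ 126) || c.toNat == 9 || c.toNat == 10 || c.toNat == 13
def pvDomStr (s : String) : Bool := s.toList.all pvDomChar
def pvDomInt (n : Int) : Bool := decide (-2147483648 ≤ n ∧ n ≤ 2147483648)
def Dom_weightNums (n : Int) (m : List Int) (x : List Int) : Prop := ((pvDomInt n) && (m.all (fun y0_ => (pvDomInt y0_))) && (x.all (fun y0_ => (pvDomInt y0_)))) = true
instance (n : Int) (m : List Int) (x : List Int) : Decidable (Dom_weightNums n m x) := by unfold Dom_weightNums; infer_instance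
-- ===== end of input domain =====

-- B replaces A's per-copy whole-set passes (one pass per unit of every count) by binary
-- splitting of each count into chunks 1,2,4,…,rest: O(log count) set unions per weight type.

-- ===== PORT A =====
def weightNums (n : Int) (m : List Int) (x : List Int) : List Int :=
  -- amount: for i in range(n): for j in range(x[i]): amount.append(m[i])
  let amount : List Int :=
    (PySem.List.pyRange 0 n 1).foldl (fun acc i =>
      (PySem.List.pyRange 0 (PySem.List.pyGetD x i 0) 1).foldl
        (fun a _ => a ++ [PySem.List.pyGetD m i 0]) acc) []
  -- for i in amount: for j in list(weights): weights.add(i+j)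
  amount.foldl (fun w i => w.foldl (fun s j => PySem.Set.add s (i + j)) w)
    (PySem.Set.ofList [0])

-- ===== PORT B =====
-- while c > 0: t = min(k, c); reach |= {s + w*t for s in reach}; c -= t; k *= 2
-- (fuel = c.toNat only makes the while-loop total; every round consumes at least 1 of c)
def wnChunks (fuel : Nat) (w : Int) (c : Int) (k : Int) (reach : PySem.Set Int) : PySem.Set Int :=
  match fuel with
  | 0 => reach
  | fuel + 1 =>
    if 0 < c then
      let t := min k c
      wnChunks fuel w (c - t) (k * 2)
        (PySem.Set.union reach (reach.map (fun s => s + w * t)))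
    else reach

def weightNums_alt (n : Int) (m : List Int) (x : List Int) : List Int :=
  (PySem.List.pyRange 0 n 1).foldl (fun reach i =>
      let c := PySem.List.pyGetD x i 0
      if c ≤ 0 then reach
      else wnChunks c.toNat (PySem.List.pyGetD m i 0) c 1 reach)
    (PySem.Set.ofList [0])

-- ===== PRECONDITION & SPEC =====
-- Pre_ excludes exactly the inputs on which Python A raises IndexError:
-- some i < n reaches past the end of x, or past the end of m when x[i] > 0.
def Pre_weightNums (n : Int) (m : List Int) (x : List Int) : Prop :=
  n ≤ (x.length : Int) ∧
    ∀ i : Nat, i < x.length → (i : Int) < n → 0 < x.getD i 0 → i < m.length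
instance (n : Int) (m : List Int) (x : List Int) : Decidable (Pre_weightNums n m x) := by
  unfold Pre_weightNums; infer_instance

def pvWitness_weightNums : Int × List Int × List Int := (2, [3, 5], [1, 2])

def Spec_weightNums (n : Int) (m : List Int) (x : List Int) (out : List Int) : Prop := out = weightNums_alt n m x
instance (n : Int) (m : List Int) (x : List Int) (out : List Int) : Decidable (Spec_weightNums n m x out) := by unfold Spec_weightNums; infer_instance

-- ===== CLAIM (what is proved, stated in full; the proofs are below) =====
def Claim_equal_weightNums : Prop := ∀ (n : Int) (m : List Int) (x : List Int), Dom_weightNums n m x → Pre_weightNums n m x → Spec_weightNums n m x (weightNums n m x)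

-- ===== LEMMAS AND PROOFS =====

-- A's inner pass over a snapshot of the set: weights ∪ (weights + d), in snapshot order
def wnStep (d : Int) (s : List Int) : List Int :=
  s.foldl (fun a j => PySem.Set.add a (j + d)) s

-- canonical enumeration: all v + w*k for k = 0..c (k outer, base elements inner)
def wnEnum (s : List Int) (w : Int) (c : Nat) : List Int :=
  (List.range (c + 1)).flatMap (fun k : Nat => s.map (fun v => v + w * (k : Int)))

-- the reachable set after granting up to c copies of weight w, in first-insertion order
def wnE (s : List Int) (w : Int) (c : Nat) : List Int :=
  PySem.Set.ofList (wnEnum s w c)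

theorem wnAddMap {f : Int → Int} (hf : Function.Injective f) (s : List Int) (a : Int) :
    PySem.Set.add (s.map f) (f a) = (PySem.Set.add s a).map f := by
  rw [PySem.Set.add_eq_ite, PySem.Set.add_eq_ite]
  by_cases h : a ∈ s
  · simp [h, List.mem_map.mpr ⟨a, h, rfl⟩]
  · have : f a ∉ s.map f := by
      intro hm
      rcases List.mem_map.mp hm with ⟨b, hb, hfb⟩
      exact h (hf hfb ▸ hb)
    simp [h, this]

theorem wnOfList_map_inj {f : Int → Int} (hf : Function.Injective f) (l : List Int) :
    PySem.Set.ofList (l.map f) = (PySem.Set.ofList l).map f := by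
  induction l using List.reverseRecOn with
  | nil => rfl
  | append_singleton l a ih =>
    rw [List.map_append, List.map_singleton, PySem.Set.ofList_append_singleton,
      PySem.Set.ofList_append_singleton, ih, wnAddMap hf]

theorem wnFilterAppend (pre extra : List Int) (P : Int → Bool)
    (h : ∀ y ∈ pre, P y = false) :
    (PySem.Set.ofList (pre ++ extra)).filter P = (PySem.Set.ofList extra).filter P := by
  rw [PySem.Set.ofList_append, PySem.Set.update_eq_append_filter, List.filter_append]
  have h1 : (PySem.Set.ofList pre).filter P = [] := by
    apply List.filter_eq_nil_iff.mpr
    intro a ha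
    simp [h a ((PySem.Set.mem_ofList _ _).mp ha)]
  rw [h1, List.nil_append, List.filter_filter]
  apply List.filter_congr
  intro y hy
  by_cases hP : P y = true
  · have hnp : y ∉ pre := fun hmem => by simp [h y hmem] at hP
    simp [hP]
    exact hnp
  · simp [Bool.not_eq_true] at hP
    simp [hP]

-- the crux: one snapshot pass with chunk weight w*t advances the canonical set
-- from c to c+t, provided t ≤ c+1 (no value is skipped)
theorem wnChunkStep (s : List Int) (w : Int) (c t : Nat) (htc : t ≤ c + 1) :
    wnStep (w * (t : Int)) (wnE s w c) = wnE s w (c + t) := by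
  have hinj : Function.Injective (fun b : Int => b + w * (t : Int)) := add_left_injective _
  have hL : wnStep (w * (t : Int)) (wnE s w c)
      = wnE s w c ++ (PySem.Set.ofList ((wnE s w c).map (fun b => b + w * (t : Int)))).filter
          (fun y => !(PySem.Set.contains (wnE s w c) y)) := by
    unfold wnStep
    rw [← PySem.Set.update_map_eq_foldl_add, PySem.Set.update_eq_append_filter]
  have hsplit : wnEnum s w (c + t)
      = wnEnum s w c ++ ((List.range t).map (fun j => c + 1 + j)).flatMap
          (fun k : Nat => s.map (fun v => v + w * (k : Int))) := by
    unfold wnEnum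
    rw [show c + t + 1 = (c + 1) + t by omega, List.range_add, List.flatMap_append]
  have hR : wnE s w (c + t)
      = wnE s w c ++ (PySem.Set.ofList (((List.range t).map (fun j => c + 1 + j)).flatMap
            (fun k : Nat => s.map (fun v => v + w * (k : Int))))).filter
          (fun y => !(PySem.Set.contains (wnE s w c) y)) := by
    unfold wnE
    rw [hsplit, PySem.Set.ofList_append, PySem.Set.update_eq_append_filter]
  rw [hL, hR]
  congr 1
  have hmap : (wnE s w c).map (fun b => b + w * (t : Int))
      = PySem.Set.ofList ((List.range (c + 1)).flatMap
          (fun k : Nat => s.map (fun v => v + w * ((k : Int) + (t : Int))))) := by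
    unfold wnE
    rw [← wnOfList_map_inj hinj]
    congr 1
    unfold wnEnum
    rw [List.map_flatMap]
    congr 1
    funext k
    rw [List.map_map]
    congr 1
    funext v
    simp [Function.comp]
    ring
  rw [hmap, PySem.Set.ofList_ofList]
  have hmid : (List.range (c + 1)).flatMap
        (fun k : Nat => s.map (fun v => v + w * ((k : Int) + (t : Int))))
      = ((List.range (c + 1 - t)).flatMap
          (fun k : Nat => s.map (fun v => v + w * ((k : Int) + (t : Int)))))
        ++ ((List.range t).map (fun j => c + 1 + j)).flatMap
            (fun k : Nat => s.map (fun v => v + w * (k : Int))) := by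
    conv_lhs => rw [show c + 1 = (c + 1 - t) + t by omega, List.range_add]
    rw [List.flatMap_append]
    congr 1
    rw [List.flatMap_map, List.flatMap_map]
    apply List.flatMap_congr
    intro j hj
    congr 1
    funext v
    congr 1
    congr 1
    omega
  rw [hmid]
  apply wnFilterAppend
  intro y hy
  simp only [List.mem_flatMap, List.mem_map, List.mem_range] at hy
  rcases hy with ⟨k, hk, v, hv, rfl⟩
  have hmem : v + w * ((k : Int) + (t : Int)) ∈ wnE s w c := by
    rw [wnE, PySem.Set.mem_ofList]
    unfold wnEnum
    simp only [List.mem_flatMap, List.mem_map, List.mem_range]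
    exact ⟨k + t, by omega, v, hv, by push_cast; ring⟩
  simp
  exact hmem

theorem wnE_zero (s : List Int) (w : Int) (hs : s.Nodup) : wnE s w 0 = s := by
  unfold wnE wnEnum
  simp [PySem.Set.ofList_eq_self_of_nodup _ hs]

theorem wnE_nodup (s : List Int) (w : Int) (c : Nat) : (wnE s w c).Nodup :=
  PySem.Set.nodup_ofList _

theorem wnRange_nonpos (c : Int) (h : c ≤ 0) : PySem.List.pyRange 0 c 1 = [] := by
  simp [PySem.List.pyRange]
  omega

theorem wnUnion_eq_step (r : List Int) (d : Int) :
    PySem.Set.union r (r.map (fun s => s + d)) = wnStep d r := by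
  show PySem.Set.update r (r.map (fun s => s + d)) = wnStep d r
  rw [PySem.Set.update_map_eq_foldl_add]
  rfl

theorem wnChunks_zero (f : Nat) (w k : Int) (r : PySem.Set Int) :
    wnChunks f w 0 k r = r := by
  cases f <;> simp [wnChunks]

-- B's while-loop computes the canonical set (invariant: 1 ≤ k ≤ done + 1)
theorem wnChunksEq (s : List Int) (w : Int) :
    ∀ (fuel : Nat) (c k : Int) (done : Nat), c.toNat ≤ fuel → 0 ≤ c → 1 ≤ k →
      k ≤ (done : Int) + 1 →
      wnChunks fuel w c k (wnE s w done) = wnE s w (done + c.toNat) := by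
  intro fuel
  induction fuel with
  | zero =>
    intro c k done hf hc _ _
    have : c.toNat = 0 := by omega
    simp [wnChunks, this]
  | succ fuel ih =>
    intro c k done hf hc hk hkd
    by_cases h : 0 < c
    · simp only [wnChunks, if_pos h]
      have htc : (min k c).toNat ≤ done + 1 := by
        have := min_le_left k c
        omega
      have hcast : ((min k c).toNat : Int) = min k c := by omega
      rw [wnUnion_eq_step]
      rw [show w * min k c = w * ((min k c).toNat : Int) by rw [hcast]]
      rw [wnChunkStep s w done (min k c).toNat htc]
      by_cases hkc : k ≤ c
      · rw [min_eq_left hkc] at *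
        have := ih (c - k) (k * 2) (done + k.toNat) (by omega) (by omega) (by omega) (by push_cast; omega)
        rw [this]
        congr 1
        omega
      · rw [min_eq_right (by omega : c ≤ k)] at *
        rw [show c - c = 0 by ring, wnChunks_zero]
    · have : c = 0 := by omega
      simp [wnChunks, this]

-- A's per-type fold (one snapshot pass per copy) computes the canonical set too
theorem wnRepeatEq (s : List Int) (w : Int) {β : Type} :
    ∀ (L : List β) (done : Nat),
      (L.map (fun _ => w)).foldl (fun acc i => acc.foldl (fun t j => PySem.Set.add t (i + j)) acc) (wnE s w done)
        = wnE s w (done + L.length) := by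
  intro L
  induction L with
  | nil => intro done; simp
  | cons b L ih =>
    intro done
    simp only [List.map_cons, List.foldl_cons, List.length_cons]
    have hstep : (wnE s w done).foldl (fun t j => PySem.Set.add t (w + j)) (wnE s w done)
        = wnE s w (done + 1) := by
      have h1 : (fun (t : PySem.Set Int) (j : Int) => PySem.Set.add t (w + j))
          = (fun t j => PySem.Set.add t (j + w)) := by
        funext a j; rw [Int.add_comm]
      rw [h1]
      have := wnChunkStep s w done 1 (by omega)
      simpa [wnStep] using this
    rw [hstep, ih (done + 1)]
    congr 1
    omega

-- the two per-type bodies agree on every Nodup state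
theorem wnPerType (ww : Int) (acc : List Int) (hnd : acc.Nodup) (c : Int) :
    ((PySem.List.pyRange 0 c 1).map (fun _ => ww)).foldl
        (fun acc' i' => acc'.foldl (fun t j => PySem.Set.add t (i' + j)) acc') acc
      = (if c ≤ 0 then acc else wnChunks c.toNat ww c 1 acc) := by
  by_cases hc : c ≤ 0
  · rw [if_pos hc, wnRange_nonpos c hc]
    rfl
  · rw [if_neg hc]
    have h0 : wnE acc ww 0 = acc := wnE_zero acc ww hnd
    calc ((PySem.List.pyRange 0 c 1).map (fun _ => ww)).foldl
            (fun acc' i' => acc'.foldl (fun t j => PySem.Set.add t (i' + j)) acc') acc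
        = ((PySem.List.pyRange 0 c 1).map (fun _ => ww)).foldl
            (fun acc' i' => acc'.foldl (fun t j => PySem.Set.add t (i' + j)) acc') (wnE acc ww 0) := by
          rw [h0]
      _ = wnE acc ww (0 + (PySem.List.pyRange 0 c 1).length) := wnRepeatEq acc ww _ 0
      _ = wnChunks c.toNat ww c 1 acc := by
          rw [← h0, wnChunksEq acc ww c.toNat c 1 0 (le_refl _) (by omega) (by omega) (by omega)]
          congr 1
          have : (PySem.List.pyRange 0 c 1).length = c.toNat := by
            conv_lhs => rw [show c = ((c.toNat : Nat) : Int) by omega]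
            rw [PySem.List.pyRange_zero_natCast]
            simp
          omega

theorem wnStateNodup (ww : Int) (s : List Int) (hnd : s.Nodup) (c : Int) :
    (if c ≤ 0 then s else wnChunks c.toNat ww c 1 s).Nodup := by
  by_cases hc : c ≤ 0
  · simpa [hc] using hnd
  · rw [if_neg hc, ← wnE_zero s ww hnd,
      wnChunksEq s ww c.toNat c 1 0 (le_refl _) (by omega) (by omega) (by omega)]
    exact wnE_nodup _ _ _

theorem wnFoldCong (m x : List Int) :
    ∀ (l : List Int) (s : List Int), s.Nodup →
      l.foldl (fun acc i =>
        ((PySem.List.pyRange 0 (PySem.List.pyGetD x i 0) 1).map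
            (fun _ => PySem.List.pyGetD m i 0)).foldl
          (fun acc' i' => acc'.foldl (fun t j => PySem.Set.add t (i' + j)) acc') acc) s
      = l.foldl (fun reach i =>
          let c := PySem.List.pyGetD x i 0
          if c ≤ 0 then reach
          else wnChunks c.toNat (PySem.List.pyGetD m i 0) c 1 reach) s := by
  intro l
  induction l with
  | nil => intro s _; rfl
  | cons i l ih =>
    intro s hnd
    rw [List.foldl_cons, List.foldl_cons,
      wnPerType (PySem.List.pyGetD m i 0) s hnd (PySem.List.pyGetD x i 0)]
    exact ih _ (wnStateNodup _ _ hnd _)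

-- ===== VERDICT (by name: the statement is the Claim_ definition above) =====
theorem weightNums_spec : Claim_equal_weightNums := by
  intro n m x _ _
  unfold Spec_weightNums weightNums weightNums_alt
  rw [show (fun (acc : List Int) (i : Int) =>
        (PySem.List.pyRange 0 (PySem.List.pyGetD x i 0) 1).foldl
          (fun a _ => a ++ [PySem.List.pyGetD m i 0]) acc)
      = (fun acc i => acc ++ ((PySem.List.pyRange 0 (PySem.List.pyGetD x i 0) 1).map
          (fun _ => PySem.List.pyGetD m i 0))) from ?_]
  · rw [PySem.List.foldl_append_eq_flatMap, List.nil_append, List.foldl_flatMap]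
    exact wnFoldCong m x _ _ (by decide)
  · funext acc i
    exact PySem.List.foldl_append_singleton_eq_map (fun _ => PySem.List.pyGetD m i 0) _ acc
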